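-- pv_equiv track=rewrite | github.com/MarcellusVR007/drone-cuas-osint-dashboard | backend/osint_loader.py | infer_purpose
-- ===== SOURCE A (Python) =====
-- def infer_purpose(description: str, location_type: str, location_name: str) -> str:
--     """Infer incident purpose from description and location"""
--     if not description:
--         return 'reconnaissance'
--
--     desc_lower = description.lower()
--     loc_lower = (location_name + ' ' + location_type).lower()
--
--     # Military incursion / hostile act
--     if any(keyword in desc_lower for keyword in ['shot down', 'jamming', 'jammed', 'military incursion', 'violation', 'airspace violation']):
--         return 'military_incursion'
--
--     # Espionage / intelligence gathering
--     if any(keyword in desc_lower for keyword in ['espionage', 'intelligence', 'sigint', 'signals']):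
--         return 'espionage'
--
--     # Sabotage / disruption
--     if any(keyword in desc_lower for keyword in ['sabotage', 'hybrid', 'disruption', 'attack', 'disrupted', 'suspended', 'paralyzed', 'closed']):
--         return 'sabotage'
--
--     # Testing / Training
--     if any(keyword in desc_lower for keyword in ['training', 'test', 'exercise', 'failed', 'crash']):
--         return 'testing'
--
--     # Commercial / Civilian
--     if any(keyword in desc_lower for keyword in ['civilian', 'commercial', 'advertising', 'filming']):
--         return 'civilian'
--
--     # Default to reconnaissance
--     return 'reconnaissance'
-- ===== SOURCE B (Python) =====
-- _LABELS = ['military_incursion', 'espionage', 'sabotage', 'testing', 'civilian']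
--
-- _KW_RANK = {
--     'shot down': 0, 'jamming': 0, 'jammed': 0, 'military incursion': 0,
--     'violation': 0, 'airspace violation': 0,
--     'espionage': 1, 'intelligence': 1, 'sigint': 1, 'signals': 1,
--     'sabotage': 2, 'hybrid': 2, 'disruption': 2, 'attack': 2,
--     'disrupted': 2, 'suspended': 2, 'paralyzed': 2, 'closed': 2,
--     'training': 3, 'test': 3, 'exercise': 3, 'failed': 3, 'crash': 3,
--     'civilian': 4, 'commercial': 4, 'advertising': 4, 'filming': 4,
-- }
--
--
-- def infer_purpose(description: str, location_type: str, location_name: str) -> str: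
--     """Infer incident purpose: collect every matching keyword's rank, keep the best (lowest)."""
--     if not description:
--         return 'reconnaissance'
--     desc_lower = description.lower()
--     loc_lower = (location_name + ' ' + location_type).lower()
--     ranks = [rank for kw, rank in _KW_RANK.items() if kw in desc_lower]
--     return _LABELS[min(ranks)] if ranks else 'reconnaissance'
-- ===== Notes on version B (the rewrite author's own statement) =====
-- stated objective: alternative
-- what changed: Instead of A's ordered early-return group checks, B uses a flat keyword-to-rank map, collects the ranks of ALL keywords occurring in the lowered description, and returns the label of the minimum rank (default 'reconnaissance').
import Mathlib
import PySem

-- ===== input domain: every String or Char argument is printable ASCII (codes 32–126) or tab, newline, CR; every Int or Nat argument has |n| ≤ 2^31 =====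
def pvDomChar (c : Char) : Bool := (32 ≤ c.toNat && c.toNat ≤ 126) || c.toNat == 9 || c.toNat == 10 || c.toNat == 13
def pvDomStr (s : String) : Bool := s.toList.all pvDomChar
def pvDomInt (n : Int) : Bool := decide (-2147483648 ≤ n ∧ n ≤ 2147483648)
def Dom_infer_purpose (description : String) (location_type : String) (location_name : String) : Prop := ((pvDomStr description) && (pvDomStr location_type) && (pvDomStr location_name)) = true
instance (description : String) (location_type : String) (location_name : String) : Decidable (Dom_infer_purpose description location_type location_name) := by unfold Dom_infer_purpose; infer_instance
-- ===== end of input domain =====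

-- B replaces A's ordered early-return group checks by a flat keyword→rank map: it collects
-- the ranks of ALL matching keywords and returns the label of the minimum rank (objective: alternative).

-- ===== PORT A =====
def infer_purpose (description : String) (location_type : String) (location_name : String) : String :=
  if description == "" then "reconnaissance"
  else
    let desc_lower := PySem.Str.lower description
    let _loc_lower := PySem.Str.lower (location_name ++ " " ++ location_type)
    if ["shot down", "jamming", "jammed", "military incursion", "violation", "airspace violation"].any
        (fun keyword => PySem.Str.isIn keyword desc_lower) then "military_incursion"
    else if ["espionage", "intelligence", "sigint", "signals"].any
        (fun keyword => PySem.Str.isIn keyword desc_lower) then "espionage"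
    else if ["sabotage", "hybrid", "disruption", "attack", "disrupted", "suspended", "paralyzed", "closed"].any
        (fun keyword => PySem.Str.isIn keyword desc_lower) then "sabotage"
    else if ["training", "test", "exercise", "failed", "crash"].any
        (fun keyword => PySem.Str.isIn keyword desc_lower) then "testing"
    else if ["civilian", "commercial", "advertising", "filming"].any
        (fun keyword => PySem.Str.isIn keyword desc_lower) then "civilian"
    else "reconnaissance"

-- ===== PORT B =====
def purposeLabels : List String :=
  ["military_incursion", "espionage", "sabotage", "testing", "civilian"]

-- the _KW_RANK dict of Source B as an association list (insertion order, all keys distinct)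
def kwRank : List (String × Nat) :=
  [("shot down", 0), ("jamming", 0), ("jammed", 0), ("military incursion", 0),
   ("violation", 0), ("airspace violation", 0),
   ("espionage", 1), ("intelligence", 1), ("sigint", 1), ("signals", 1),
   ("sabotage", 2), ("hybrid", 2), ("disruption", 2), ("attack", 2),
   ("disrupted", 2), ("suspended", 2), ("paralyzed", 2), ("closed", 2),
   ("training", 3), ("test", 3), ("exercise", 3), ("failed", 3), ("crash", 3),
   ("civilian", 4), ("commercial", 4), ("advertising", 4), ("filming", 4)]

def infer_purpose_alt (description : String) (location_type : String) (location_name : String) : String :=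
  if description == "" then "reconnaissance"
  else
    let desc_lower := PySem.Str.lower description
    let _loc_lower := PySem.Str.lower (location_name ++ " " ++ location_type)
    let ranks := (kwRank.filter (fun p => PySem.Str.isIn p.1 desc_lower)).map Prod.snd
    match ranks.min? with                      -- Python's min(ranks) on a nonempty list
    | some r => purposeLabels.getD r "reconnaissance"  -- _LABELS[r]; r < 5 always, so plain indexing
    | none => "reconnaissance"

-- ===== PRECONDITION & SPEC =====
def Spec_infer_purpose (description : String) (location_type : String) (location_name : String) (out : String) : Prop := out = infer_purpose_alt description location_type location_name
instance (description : String) (location_type : String) (location_name : String) (out : String) : Decidable (Spec_infer_purpose description location_type location_name out) := by unfold Spec_infer_purpose; infer_instance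

-- ===== CLAIM (what is proved, stated in full; the proofs are below) =====
def Claim_equal_infer_purpose : Prop := ∀ (description : String) (location_type : String) (location_name : String), Dom_infer_purpose description location_type location_name → Spec_infer_purpose description location_type location_name (infer_purpose description location_type location_name)

-- ===== LEMMAS AND PROOFS =====

-- min? of the ranks contributed by one keyword group (constant rank r)
theorem min?_group (l : List String) (c : String → Bool) (r : Nat) :
    (((l.map (fun k => (k, r))).filter (fun p => c p.1)).map Prod.snd).min?
      = if l.any c then some r else none := by
  induction l with
  | nil => simp
  | cons k t ih =>
      by_cases h : c k = true
      · by_cases ha : t.any c = true <;>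
          simp [List.min?_cons, ih, ha, h, Option.elim]
      · simp [h, ih]

theorem min?_append (xs ys : List Nat) :
    (xs ++ ys).min? = match xs.min?, ys.min? with
      | none, o => o
      | some a, none => some a
      | some a, some b => some (min a b) := by
  induction xs with
  | nil =>
      simp only [List.nil_append, List.min?_nil]
  | cons x t ih =>
      rw [List.cons_append, List.min?_cons, List.min?_cons, ih]
      cases ht : t.min? <;> cases hy : ys.min? <;> simp [Option.elim, min_assoc]

-- ===== VERDICT (by name: the statement is the Claim_ definition above) =====
theorem infer_purpose_spec : Claim_equal_infer_purpose := by
  intro description location_type location_name _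
  unfold Spec_infer_purpose infer_purpose infer_purpose_alt
  by_cases hd : description == ""
  · simp [hd]
  · simp only [hd, if_false, Bool.false_eq_true]
    set d := PySem.Str.lower description with hdl
    have hsplit : kwRank =
        (["shot down", "jamming", "jammed", "military incursion", "violation", "airspace violation"].map (fun k => (k, 0)))
        ++ ((["espionage", "intelligence", "sigint", "signals"].map (fun k => (k, 1)))
        ++ ((["sabotage", "hybrid", "disruption", "attack", "disrupted", "suspended", "paralyzed", "closed"].map (fun k => (k, 2)))
        ++ ((["training", "test", "exercise", "failed", "crash"].map (fun k => (k, 3)))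
        ++ (["civilian", "commercial", "advertising", "filming"].map (fun k => (k, 4)))))) := by rfl
    rw [hsplit]
    simp only [List.filter_append, List.map_append]
    rw [min?_append, min?_append, min?_append, min?_append,
        min?_group _ (fun k => PySem.Str.isIn k d) 0,
        min?_group _ (fun k => PySem.Str.isIn k d) 1,
        min?_group _ (fun k => PySem.Str.isIn k d) 2,
        min?_group _ (fun k => PySem.Str.isIn k d) 3,
        min?_group _ (fun k => PySem.Str.isIn k d) 4]
    by_cases b0 : List.any ["shot down", "jamming", "jammed", "military incursion", "violation", "airspace violation"] (fun k => PySem.Str.isIn k d) = true <;>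
    by_cases b1 : List.any ["espionage", "intelligence", "sigint", "signals"] (fun k => PySem.Str.isIn k d) = true <;>
    by_cases b2 : List.any ["sabotage", "hybrid", "disruption", "attack", "disrupted", "suspended", "paralyzed", "closed"] (fun k => PySem.Str.isIn k d) = true <;>
    by_cases b3 : List.any ["training", "test", "exercise", "failed", "crash"] (fun k => PySem.Str.isIn k d) = true <;>
    by_cases b4 : List.any ["civilian", "commercial", "advertising", "filming"] (fun k => PySem.Str.isIn k d) = true <;>
    simp only [b0, b1, b2, b3, b4, if_false, Bool.false_eq_true] <;> simp [purposeLabels]
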